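-- pv_equiv track=rewrite | github.com/MrBrantCode/unitest_baseline | mut_generate/mist_train_taco/taco_13939/solution.py | count_distinct_cyclical_strings
-- ===== SOURCE A (Python) =====
-- def count_distinct_cyclical_strings(n: int, s: str) -> int:
--     m = len(s)
--     z = [[0, 0]]
--     for c in s:
--         ind = z[-1][c == '1']
--         z[-1][c == '1'] = len(z)
--         z.append(z[ind][:])
--     assert len(z) == m + 1
--     z[m][0] = z[m][1] = m
--     dp = [0 for _ in range(m + 1)]
--     dp[0] = 1
--     for i in range(n):
--         ndp = [0 for _ in range(m + 1)]
--         for i in range(m + 1):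
--             ndp[z[i][0]] += dp[i]
--             ndp[z[i][1]] += dp[i]
--         dp = ndp
--     res = dp[m]
--     for k in range(1, m):
--         s0 = 0
--         for c in s[-k:]:
--             s0 = z[s0][c == '1']
--         dp = [0 for _ in range(m + 1)]
--         dp[s0] = 1
--         for i in range(n - k):
--             ndp = [0 for _ in range(m + 1)]
--             for i in range(m + 1):
--                 ndp[z[i][0]] += dp[i]
--                 ndp[z[i][1]] += dp[i]
--             dp = ndp
--         for s1 in range(m):
--             v = dp[s1]
--             for c in s[-k:]:
--                 if s1 == m:
--                     v = 0
--                 s1 = z[s1][c == '1']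
--             if s1 == m:
--                 res += v
--     return res
-- ===== SOURCE B (Python) =====
-- def count_distinct_cyclical_strings(n: int, s: str) -> int:
--     m = len(s)
--     z = [[0, 0]]
--     for c in s:
--         b = 1 if c == '1' else 0
--         ind = z[-1][b]
--         z[-1][b] = len(z)
--         z.append(z[ind][:])
--     z[m][0] = z[m][1] = m
--
--     def back(u, t):
--         # adjoint (gather) DP: u <- M^T u applied t times, where M is the
--         # automaton's transition-count matrix
--         for _ in range(t):
--             u = [u[z[i][0]] + u[z[i][1]] for i in range(m + 1)]
--         return u
--
--     g = [0] * m + [1]   # indicator of the match state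
--     res = back(g, n)[0]
--     for k in range(1, m):
--         c = s[m - k]
--         b = 1 if c == '1' else 0
--         g = [1 if (i != m and g[z[i][b]] == 1) else 0 for i in range(m + 1)]
--         s0 = 0
--         for ch in s[m - k:]:
--             s0 = z[s0][1 if ch == '1' else 0]
--         res += back(g, n - k)[s0]
--     return res
-- ===== Notes on version B (the rewrite author's own statement) =====
-- stated objective: faster
-- what changed: A re-simulates the suffix from every start state (O(m*k) per wrap length k) and reads the forward scatter DP; B runs the adjoint automaton DP (gather form, u[i] = u[z[i][0]] + u[z[i][1]]) from an incrementally maintained indicator vector of good start states, so the per-state suffix re-simulation loop disappears.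
import Mathlib
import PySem

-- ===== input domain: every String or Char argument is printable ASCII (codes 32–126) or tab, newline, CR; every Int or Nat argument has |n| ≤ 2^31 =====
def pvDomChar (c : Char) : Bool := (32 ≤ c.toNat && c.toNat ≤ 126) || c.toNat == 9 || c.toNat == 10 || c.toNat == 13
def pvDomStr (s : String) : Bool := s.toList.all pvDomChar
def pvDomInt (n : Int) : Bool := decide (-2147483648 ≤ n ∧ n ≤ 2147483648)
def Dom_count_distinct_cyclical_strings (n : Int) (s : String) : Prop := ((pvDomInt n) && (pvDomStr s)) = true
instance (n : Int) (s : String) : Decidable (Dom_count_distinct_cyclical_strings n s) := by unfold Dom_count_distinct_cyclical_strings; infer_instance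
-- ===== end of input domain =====

-- B replaces A's per-start-state suffix re-simulation read-out by the adjoint (gather)
-- automaton DP over an incrementally maintained good-state indicator vector (objective: faster).


-- ===== PORT A =====
-- A-side helpers (pattern-automaton rows are Python 2-lists indexed by the bool c=='1';
-- ported as pairs (entry for '0', entry for '1'); all indices are provably in range,
-- so Python's l[j] / l[j] += v are exact as getD/set).

-- one step of the incremental automaton construction: mutate last row, append a copy
def pvZStepA (z : List (Nat × Nat)) (c : Char) : List (Nat × Nat) :=
  let last := z.getD (z.length - 1) (0, 0)
  let ind := if c == '1' then last.2 else last.1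
  let z' := z.set (z.length - 1) (if c == '1' then (last.1, z.length) else (z.length, last.2))
  z' ++ [z'.getD ind (0, 0)]

def pvZRawA (cs : List Char) : List (Nat × Nat) := cs.foldl pvZStepA [(0, 0)]

-- z after 'z[m][0] = z[m][1] = m'
def pvZA (cs : List Char) : List (Nat × Nat) := (pvZRawA cs).set cs.length (cs.length, cs.length)

def pvDeltaA (z : List (Nat × Nat)) (q : Nat) (c : Char) : Nat :=
  if c == '1' then (z.getD q (0, 0)).2 else (z.getD q (0, 0)).1

-- l[j] += v
def pvBumpA (l : List Int) (j : Nat) (v : Int) : List Int := l.set j (l.getD j 0 + v)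

-- one dp iteration: ndp[z[i][0]] += dp[i]; ndp[z[i][1]] += dp[i]
def pvStepA (z : List (Nat × Nat)) (size : Nat) (dp : List Int) : List Int :=
  (List.range size).foldl
    (fun ndp i =>
      let p := z.getD i (0, 0)
      pvBumpA (pvBumpA ndp p.1 (dp.getD i 0)) p.2 (dp.getD i 0))
    (List.replicate size 0)

-- 'for _ in range(t): dp = step(dp)'
def pvStepNA (z : List (Nat × Nat)) (size : Nat) : Nat → List Int → List Int
  | 0, dp => dp
  | t + 1, dp => pvStepNA z size t (pvStepA z size dp)

-- automaton run: for c in suf: q = z[q][c == '1']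
def pvRunA (z : List (Nat × Nat)) (q0 : Nat) (suf : List Char) : Nat :=
  suf.foldl (pvDeltaA z) q0

-- the 'for s1 in range(m)' read-out loop
def pvTailA (z : List (Nat × Nat)) (m : Nat) (suf : List Char) (dp : List Int) (res : Int) : Int :=
  (List.range m).foldl (fun r s1 =>
    let st := suf.foldl
      (fun (p : Nat × Int) c => (pvDeltaA z p.1 c, if p.1 = m then 0 else p.2))
      (s1, dp.getD s1 0)
    if st.1 = m then r + st.2 else r) res

def count_distinct_cyclical_strings (n : Int) (s : String) : Int :=
  let cs := s.toList
  let m := cs.length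
  let z := pvZA cs
  let dp0 := (List.replicate (m + 1) (0 : Int)).set 0 1
  let dp := pvStepNA z (m + 1) n.toNat dp0
  let res := dp.getD m 0
  (List.range' 1 (m - 1)).foldl (fun res k =>
    let suf := cs.drop (m - k)          -- s[-k:] for 1 ≤ k < m
    let s0 := pvRunA z 0 suf
    let dp1 := (List.replicate (m + 1) (0 : Int)).set s0 1
    let dpk := pvStepNA z (m + 1) (n - (k : Int)).toNat dp1
    pvTailA z m suf dpk res) res

-- ===== PORT B =====
-- B-side helpers: the same automaton construction and suffix runs (Source B shares
-- them with A), plus the adjoint (gather) DP step and the good-state vector.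

def pvZStepB (z : List (Nat × Nat)) (c : Char) : List (Nat × Nat) :=
  let last := z.getD (z.length - 1) (0, 0)
  let ind := if c == '1' then last.2 else last.1
  let z' := z.set (z.length - 1) (if c == '1' then (last.1, z.length) else (z.length, last.2))
  z' ++ [z'.getD ind (0, 0)]

def pvZRawB (cs : List Char) : List (Nat × Nat) := cs.foldl pvZStepB [(0, 0)]

def pvZB (cs : List Char) : List (Nat × Nat) := (pvZRawB cs).set cs.length (cs.length, cs.length)

def pvDeltaB (z : List (Nat × Nat)) (q : Nat) (c : Char) : Nat :=
  if c == '1' then (z.getD q (0, 0)).2 else (z.getD q (0, 0)).1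

def pvRunB (z : List (Nat × Nat)) (q0 : Nat) (suf : List Char) : Nat :=
  suf.foldl (pvDeltaB z) q0

-- u = [u[z[i][0]] + u[z[i][1]] for i in range(m + 1)]
def pvBStepB (z : List (Nat × Nat)) (size : Nat) (u : List Int) : List Int :=
  (List.range size).map (fun i => u.getD (z.getD i (0, 0)).1 0 + u.getD (z.getD i (0, 0)).2 0)

-- 'for _ in range(t): u = ...' of back(u, t)
def pvBackB (z : List (Nat × Nat)) (size : Nat) : Nat → List Int → List Int
  | 0, u => u
  | t + 1, u => pvBackB z size t (pvBStepB z size u)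

-- g = [1 if (i != m and g[z[i][b]] == 1) else 0 for i in range(m + 1)]
def pvGStepB (z : List (Nat × Nat)) (size m : Nat) (c : Char) (g : List Int) : List Int :=
  (List.range size).map (fun i => if i ≠ m ∧ g.getD (pvDeltaB z i c) 0 = 1 then 1 else 0)

def count_distinct_cyclical_strings_alt (n : Int) (s : String) : Int :=
  let cs := s.toList
  let m := cs.length
  let z := pvZB cs
  let g0 : List Int := List.replicate m 0 ++ [1]
  let res := (pvBackB z (m + 1) n.toNat g0).getD 0 0
  ((List.range' 1 (m - 1)).foldl (fun (st : List Int × Int) k =>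
      let c := cs.getD (m - k) ' '       -- s[m-k], index provably in range
      let g := pvGStepB z (m + 1) m c st.1
      let s0 := pvRunB z 0 (cs.drop (m - k))
      (g, st.2 + (pvBackB z (m + 1) (n - (k : Int)).toNat g).getD s0 0))
    (g0, res)).2

-- ===== PRECONDITION & SPEC =====
def Spec_count_distinct_cyclical_strings (n : Int) (s : String) (out : Int) : Prop := out = count_distinct_cyclical_strings_alt n s
instance (n : Int) (s : String) (out : Int) : Decidable (Spec_count_distinct_cyclical_strings n s out) := by unfold Spec_count_distinct_cyclical_strings; infer_instance

-- ===== CLAIM (what is proved, stated in full; the proofs are below) =====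
def Claim_equal_count_distinct_cyclical_strings : Prop := ∀ (n : Int) (s : String), Dom_count_distinct_cyclical_strings n s → Spec_count_distinct_cyclical_strings n s (count_distinct_cyclical_strings n s)

-- ===== LEMMAS AND PROOFS =====
theorem pvZB_eq : pvZB = pvZA := rfl
theorem pvRunB_eq : pvRunB = pvRunA := rfl
theorem pvDeltaB_eq : pvDeltaB = pvDeltaA := rfl

-- sum(f(k) for k in range(nn)) (proof-side abbreviation)
def pvSumR (f : Nat → Int) (nn : Nat) : Int := ((List.range nn).map f).sum

-- number of bits leading state i to state j
def pvEnt (z : List (Nat × Nat)) (j i : Nat) : Int :=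
  (if (z.getD i (0,0)).1 = j then 1 else 0) + (if (z.getD i (0,0)).2 = j then 1 else 0)

-- 1 if the run from q on suf stays off the match state m and ends exactly on it
def pvGoodFn (z : List (Nat × Nat)) (m : Nat) : List Char → Nat → Int
  | [], q => if q = m then 1 else 0
  | c :: cs, q => if q = m then 0 else pvGoodFn z m cs (pvDeltaA z q c)

theorem pvZRawA_len (cs : List Char) : (pvZRawA cs).length = cs.length + 1 := by
  suffices h : ∀ (l : List (Nat × Nat)) (cs : List Char), (cs.foldl pvZStepA l).length = l.length + cs.length by
    rw [pvZRawA, h]; simp; omega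
  intro l cs
  induction cs generalizing l with
  | nil => simp
  | cons c cs ih => simp [pvZStepA, ih]; omega


theorem pvZStepA_len (l : List (Nat × Nat)) (c : Char) : (pvZStepA l c).length = l.length + 1 := by
  simp [pvZStepA]


theorem pvZStepA_bound (l : List (Nat × Nat)) (c : Char)
    (hl : ∀ p ∈ l, p.1 < l.length ∧ p.2 < l.length) :
    ∀ q ∈ pvZStepA l c, q.1 < (pvZStepA l c).length ∧ q.2 < (pvZStepA l c).length := by
  intro q hq
  rw [pvZStepA_len]
  have hlast : (l.getD (l.length - 1) (0,0)).1 < l.length + 1 ∧ (l.getD (l.length - 1) (0,0)).2 < l.length + 1 := by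
    by_cases hnil : l.length = 0
    · rw [List.getD_eq_default _ _ (by omega)]; simp
    · have hlt : l.length - 1 < l.length := by omega
      rw [List.getD_eq_getElem _ _ hlt]
      have := hl _ (List.getElem_mem hlt)
      omega
  have hz' : ∀ q ∈ l.set (l.length - 1)
      (if c == '1' then ((l.getD (l.length - 1) (0,0)).1, l.length) else (l.length, (l.getD (l.length - 1) (0,0)).2)),
      q.1 < l.length + 1 ∧ q.2 < l.length + 1 := by
    intro q hq
    rcases List.mem_or_eq_of_mem_set hq with h1 | h1
    · have := hl q h1; omega
    · subst h1; split <;> constructor <;> dsimp only <;> omega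
  simp only [pvZStepA, List.mem_append, List.mem_singleton] at hq
  rcases hq with hq | hq
  · have := hz' q hq; omega
  · subst hq
    set z' := l.set (l.length - 1) _ with hz'def
    set ind := if c == '1' then (l.getD (l.length - 1) (0,0)).2 else (l.getD (l.length - 1) (0,0)).1 with hind
    by_cases hr : ind < z'.length
    · rw [List.getD_eq_getElem _ _ hr]
      have hlz : z'.length = l.length := by simp [hz'def]
      have := hz' _ (List.getElem_mem hr)
      omega
    · rw [List.getD_eq_default _ _ (by omega)]; simp


theorem pvZRawA_bound (cs : List Char) :
    ∀ p ∈ pvZRawA cs, p.1 < cs.length + 1 ∧ p.2 < cs.length + 1 := by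
  suffices h : ∀ (cs : List Char) (l : List (Nat × Nat)),
      (∀ p ∈ l, p.1 < l.length ∧ p.2 < l.length) →
      ∀ p ∈ cs.foldl pvZStepA l, p.1 < (cs.foldl pvZStepA l).length ∧ p.2 < (cs.foldl pvZStepA l).length by
    intro p hp
    have h2 := h cs [(0,0)] (by simp) p hp
    have h3 : (List.foldl pvZStepA [(0,0)] cs).length = cs.length + 1 := pvZRawA_len cs
    rw [h3] at h2
    exact h2
  intro cs
  induction cs with
  | nil => intro l hl; simpa using hl
  | cons c cs ih =>
    intro l hl
    simp only [List.foldl_cons]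
    exact ih (pvZStepA l c) (pvZStepA_bound l c hl)


theorem pvZA_mem_bound (cs : List Char) :
    ∀ p ∈ pvZA cs, p.1 ≤ cs.length ∧ p.2 ≤ cs.length := by
  intro p hp
  rw [pvZA] at hp
  rcases List.mem_or_eq_of_mem_set hp with h1 | h1
  · have := pvZRawA_bound cs _ h1; omega
  · subst h1; simp

-- every transition, read anywhere via getD, is ≤ m

theorem pvZA_bound (cs : List Char) (q : Nat) :
    ((pvZA cs).getD q (0,0)).1 ≤ cs.length ∧ ((pvZA cs).getD q (0,0)).2 ≤ cs.length := by
  by_cases hq : q < (pvZA cs).length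
  · rw [List.getD_eq_getElem _ _ hq]
    exact pvZA_mem_bound cs _ (List.getElem_mem hq)
  · rw [List.getD_eq_default _ _ (by omega)]; simp
theorem pvSumR_eq (f : Nat → Int) (n : Nat) : pvSumR f n = ∑ i ∈ Finset.range n, f i := by
  induction n with
  | zero => simp [pvSumR]
  | succ n ih => simp [pvSumR, List.range_succ, Finset.sum_range_succ] at *; omega


theorem pvBumpA_len (l : List Int) (j : Nat) (v : Int) : (pvBumpA l j v).length = l.length := by
  simp [pvBumpA]


theorem pvBumpA_getD (l : List Int) (j : Nat) (v : Int) (hj : j < l.length) (j' : Nat) :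
    (pvBumpA l j v).getD j' 0 = l.getD j' 0 + if j' = j then v else 0 := by
  unfold pvBumpA
  by_cases he : j' = j
  · subst he
    rw [List.getD_eq_getElem _ _ (by simpa using hj), List.getElem_set_self (by simpa using hj),
        List.getD_eq_getElem _ _ hj]
    simp
  · rw [if_neg he]
    by_cases hj' : j' < l.length
    · rw [List.getD_eq_getElem _ _ (by simpa using hj'), List.getElem_set_ne (by omega),
          List.getD_eq_getElem _ _ hj']
      simp
    · rw [List.getD_eq_default _ _ (by simpa using hj'), List.getD_eq_default _ _ (by omega)]
      simp

-- dp-step fold invariant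

theorem pvStepA_fold (z : List (Nat × Nat)) (size : Nat) (dp : List Int)
    (hz : ∀ q, ((z.getD q (0,0)).1 < size ∧ (z.getD q (0,0)).2 < size)) :
    ∀ (l : List Nat) (ndp : List Int), ndp.length = size →
      ((l.foldl (fun ndp i =>
          let p := z.getD i (0, 0)
          pvBumpA (pvBumpA ndp p.1 (dp.getD i 0)) p.2 (dp.getD i 0)) ndp).length = size ∧
       ∀ j, (l.foldl (fun ndp i =>
          let p := z.getD i (0, 0)
          pvBumpA (pvBumpA ndp p.1 (dp.getD i 0)) p.2 (dp.getD i 0)) ndp).getD j 0 =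
          ndp.getD j 0 + (l.map (fun i => pvEnt z j i * dp.getD i 0)).sum) := by
  intro l
  induction l with
  | nil => intro ndp h; simp [h]
  | cons a l ih =>
    intro ndp h
    simp only [List.foldl_cons]
    have hlen : (pvBumpA (pvBumpA ndp (z.getD a (0,0)).1 (dp.getD a 0)) (z.getD a (0,0)).2 (dp.getD a 0)).length = size := by
      rw [pvBumpA_len, pvBumpA_len, h]
    obtain ⟨ihl, ihe⟩ := ih _ hlen
    refine ⟨ihl, fun j => ?_⟩
    rw [ihe j]
    rw [pvBumpA_getD _ _ _ (by rw [pvBumpA_len]; rw [h]; exact (hz a).2),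
        pvBumpA_getD _ _ _ (by rw [h]; exact (hz a).1)]
    simp only [List.map_cons, List.sum_cons]
    unfold pvEnt
    split_ifs <;> (try (exfalso; omega)) <;> ring


theorem pvStepA_getD (z : List (Nat × Nat)) (size : Nat) (dp : List Int)
    (hz : ∀ q, ((z.getD q (0,0)).1 < size ∧ (z.getD q (0,0)).2 < size)) (j : Nat) :
    (pvStepA z size dp).getD j 0 = pvSumR (fun i => pvEnt z j i * dp.getD i 0) size := by
  have h := (pvStepA_fold z size dp hz (List.range size) (List.replicate size 0) (by simp)).2 j
  unfold pvStepA
  rw [h]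
  have hreplicate : (List.replicate size (0:Int)).getD j 0 = 0 := by
    by_cases hj : j < size
    · exact List.getD_replicate _ hj
    · rw [List.getD_eq_default _ _ (by simpa using hj)]
  rw [hreplicate, pvSumR]
  simp
-- transition-matrix build

theorem pvUnit_getD (size s0 : Nat) (hs0 : s0 < size) (i : Nat) :
    ((List.replicate size (0:Int)).set s0 1).getD i 0 = if i = s0 then 1 else 0 := by
  by_cases he : i = s0
  · subst he
    rw [List.getD_eq_getElem _ _ (by simpa using hs0), List.getElem_set_self (by simpa using hs0)]
    simp
  · rw [if_neg he]
    by_cases hi : i < size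
    · rw [List.getD_eq_getElem _ _ (by simpa using hi), List.getElem_set_ne (by omega),
          List.getElem_replicate]
    · rw [List.getD_eq_default _ _ (by simpa using hi)]


theorem pvHz (cs : List Char) : ∀ q, (((pvZA cs).getD q (0,0)).1 < cs.length + 1 ∧
    ((pvZA cs).getD q (0,0)).2 < cs.length + 1) := by
  intro q
  have := pvZA_bound cs q
  omega


theorem pvRunA_le (cs : List Char) (suf : List Char) (q0 : Nat) (h : q0 ≤ cs.length) :
    pvRunA (pvZA cs) q0 suf ≤ cs.length := by
  induction suf generalizing q0 with
  | nil => exact h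
  | cons c suf ih =>
    show pvRunA (pvZA cs) (pvDeltaA (pvZA cs) q0 c) suf ≤ cs.length
    apply ih
    unfold pvDeltaA
    split
    · exact (pvZA_bound cs q0).2
    · exact (pvZA_bound cs q0).1



theorem pvGoodFn_01 (z : List (Nat × Nat)) (m : Nat) (suf : List Char) (q : Nat) :
    pvGoodFn z m suf q = 0 ∨ pvGoodFn z m suf q = 1 := by
  induction suf generalizing q with
  | nil => unfold pvGoodFn; split_ifs <;> simp
  | cons c cs ih => unfold pvGoodFn; split_ifs <;> first | simp | exact ih _

theorem pvFoldlCongr {α : Type} (f g : Int → α → Int) (l : List α) (init : Int)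
    (h : ∀ r x, f r x = g r x) : l.foldl f init = l.foldl g init := by
  have he : f = g := funext fun r => funext fun x => h r x
  rw [he]

-- generic loop shape: accumulate-only foldl is init + a sum
theorem pvFoldlAdd {α : Type} (h : α → Int) (l : List α) (init : Int) :
    l.foldl (fun r x => r + h x) init = init + (l.map h).sum := by
  induction l generalizing init with
  | nil => simp
  | cons a l ih => simp [ih]; ring

theorem pvTail_inner (z : List (Nat × Nat)) (m : Nat) (suf : List Char) (q : Nat) (v : Int) :
    (let st := suf.foldl (fun (p : Nat × Int) c => (pvDeltaA z p.1 c, if p.1 = m then 0 else p.2)) (q, v)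
     if st.1 = m then st.2 else 0) = v * pvGoodFn z m suf q := by
  induction suf generalizing q v with
  | nil => by_cases h : q = m <;> simp [pvGoodFn, h]
  | cons c cs ih =>
    simp only [List.foldl_cons]
    rw [ih (pvDeltaA z q c) (if q = m then 0 else v)]
    by_cases h : q = m <;> simp [pvGoodFn, h]

-- the A-side read-out loop is a weighted sum of pvGoodFn
theorem pvTailA_eq (z : List (Nat × Nat)) (m : Nat) (suf : List Char) (dp : List Int) (res : Int) :
    pvTailA z m suf dp res = res + pvSumR (fun s1 => dp.getD s1 0 * pvGoodFn z m suf s1) m := by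
  unfold pvTailA pvSumR
  have hbody : ∀ (r : Int) (s1 : Nat),
      (let st := suf.foldl (fun (p : Nat × Int) c => (pvDeltaA z p.1 c, if p.1 = m then 0 else p.2))
        (s1, dp.getD s1 0)
       if st.1 = m then r + st.2 else r) = r + dp.getD s1 0 * pvGoodFn z m suf s1 := by
    intro r s1
    have := pvTail_inner z m suf s1 (dp.getD s1 0)
    simp only at this ⊢
    split_ifs at this ⊢ <;> omega
  calc (List.range m).foldl _ res
      = (List.range m).foldl (fun r s1 => r + dp.getD s1 0 * pvGoodFn z m suf s1) res := by
        apply pvFoldlCongr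
        exact hbody
    _ = _ := pvFoldlAdd _ _ _

-- entry lemmas for the gather step
theorem pvBStepB_getD (z : List (Nat × Nat)) (size : Nat) (u : List Int) (i : Nat) :
    (pvBStepB z size u).getD i 0 =
      if i < size then u.getD (z.getD i (0,0)).1 0 + u.getD (z.getD i (0,0)).2 0 else 0 := by
  unfold pvBStepB
  simp only [List.getD_eq_getElem?_getD, List.getElem?_map]
  by_cases hi : i < size <;> simp [hi]

theorem pvGStepB_getD (z : List (Nat × Nat)) (size m : Nat) (c : Char) (g : List Int) (i : Nat) :
    (pvGStepB z size m c g).getD i 0 =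
      if i < size then (if i ≠ m ∧ g.getD (pvDeltaA z i c) 0 = 1 then 1 else 0) else 0 := by
  unfold pvGStepB
  rw [pvDeltaB_eq]
  simp only [List.getD_eq_getElem?_getD, List.getElem?_map]
  by_cases hi : i < size <;> simp [hi]

-- Σ_{j<size} [a = j] * w j = w a  (a < size)
theorem pvSumIndic (w : Nat → Int) (a size : Nat) (h : a < size) :
    ∑ j ∈ Finset.range size, (if a = j then (1:Int) else 0) * w j = w a := by
  rw [Finset.sum_eq_single a]
  · simp
  · intro k _ hk
    rw [if_neg (by omega), zero_mul]
  · intro hne; exact absurd (Finset.mem_range.mpr h) hne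

-- adjointness: one scatter step against u = dp against one gather step
theorem pvAdjoint (z : List (Nat × Nat)) (size : Nat)
    (hz : ∀ q, ((z.getD q (0,0)).1 < size ∧ (z.getD q (0,0)).2 < size))
    (dp u : List Int) :
    ∑ j ∈ Finset.range size, (pvStepA z size dp).getD j 0 * u.getD j 0 =
    ∑ i ∈ Finset.range size, dp.getD i 0 * (pvBStepB z size u).getD i 0 := by
  have hstep : ∀ j, (pvStepA z size dp).getD j 0 =
      ∑ i ∈ Finset.range size, pvEnt z j i * dp.getD i 0 := by
    intro j
    rw [pvStepA_getD z size dp hz j, pvSumR_eq]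
  calc ∑ j ∈ Finset.range size, (pvStepA z size dp).getD j 0 * u.getD j 0
      = ∑ j ∈ Finset.range size, ∑ i ∈ Finset.range size,
          pvEnt z j i * dp.getD i 0 * u.getD j 0 := by
        apply Finset.sum_congr rfl
        intro j _
        rw [hstep j, Finset.sum_mul]
    _ = ∑ i ∈ Finset.range size, ∑ j ∈ Finset.range size,
          pvEnt z j i * dp.getD i 0 * u.getD j 0 := Finset.sum_comm
    _ = ∑ i ∈ Finset.range size, dp.getD i 0 * (pvBStepB z size u).getD i 0 := by
        apply Finset.sum_congr rfl
        intro i hi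
        rw [pvBStepB_getD, if_pos (Finset.mem_range.mp hi)]
        unfold pvEnt
        rw [Finset.sum_congr rfl (fun j _ => by ring :
          ∀ j ∈ Finset.range size,
            ((if (z.getD i (0,0)).1 = j then (1:Int) else 0) + (if (z.getD i (0,0)).2 = j then (1:Int) else 0))
              * dp.getD i 0 * u.getD j 0 =
            (if (z.getD i (0,0)).1 = j then (1:Int) else 0) * u.getD j 0 * dp.getD i 0
              + (if (z.getD i (0,0)).2 = j then (1:Int) else 0) * u.getD j 0 * dp.getD i 0),
          Finset.sum_add_distrib, ← Finset.sum_mul, ← Finset.sum_mul,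
          pvSumIndic (fun j => u.getD j 0) _ size (hz i).1,
          pvSumIndic (fun j => u.getD j 0) _ size (hz i).2]
        ring

-- pvBackB commutes with one more gather step
theorem pvBackB_comm (z : List (Nat × Nat)) (size : Nat) (t : Nat) (u : List Int) :
    pvBackB z size t (pvBStepB z size u) = pvBStepB z size (pvBackB z size t u) := by
  induction t generalizing u with
  | zero => rfl
  | succ t ih =>
    show pvBackB z size t (pvBStepB z size (pvBStepB z size u)) = _
    rw [ih (pvBStepB z size u)]
    rfl

-- the bilinear bridge: t scatter steps against u = dp against t gather steps
theorem pvBilinear (z : List (Nat × Nat)) (size : Nat)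
    (hz : ∀ q, ((z.getD q (0,0)).1 < size ∧ (z.getD q (0,0)).2 < size)) :
    ∀ (t : Nat) (dp u : List Int),
    ∑ j ∈ Finset.range size, (pvStepNA z size t dp).getD j 0 * u.getD j 0 =
    ∑ i ∈ Finset.range size, dp.getD i 0 * (pvBackB z size t u).getD i 0 := by
  intro t
  induction t with
  | zero => intro dp u; rfl
  | succ t ih =>
    intro dp u
    show ∑ j ∈ Finset.range size, (pvStepNA z size t (pvStepA z size dp)).getD j 0 * u.getD j 0 = _
    rw [ih (pvStepA z size dp) u, pvAdjoint z size hz dp (pvBackB z size t u), ← pvBackB_comm]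
    rfl

-- A's dp read-outs as entries of the backward DP
theorem pvReadout (z : List (Nat × Nat)) (size : Nat)
    (hz : ∀ q, ((z.getD q (0,0)).1 < size ∧ (z.getD q (0,0)).2 < size))
    (t : Nat) (s0 : Nat) (hs0 : s0 < size) (u : List Int) :
    ∑ j ∈ Finset.range size,
      (pvStepNA z size t ((List.replicate size (0:Int)).set s0 1)).getD j 0 * u.getD j 0 =
    (pvBackB z size t u).getD s0 0 := by
  rw [pvBilinear z size hz t _ u]
  rw [Finset.sum_congr rfl (fun i _ =>
    show ((List.replicate size (0:Int)).set s0 1).getD i 0 * (pvBackB z size t u).getD i 0 =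
      (if s0 = i then (1:Int) else 0) * (pvBackB z size t u).getD i 0 from by
        rw [pvUnit_getD size s0 hs0 i]
        split_ifs <;> first | rfl | omega)]
  exact pvSumIndic _ s0 size hs0

-- the initial vector g0 = [0]*m ++ [1] is the indicator of m
theorem pvG0_getD (m j : Nat) :
    (List.replicate m (0:Int) ++ [1]).getD j 0 = if j = m then 1 else 0 := by
  by_cases h : j < m
  · rw [List.getD_append _ _ _ _ (by simpa using h), List.getD_replicate _ h, if_neg (by omega)]
  · by_cases h2 : j = m
    · subst h2
      rw [List.getD_append_right _ _ _ _ (by simp)]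
      simp
    · rw [List.getD_append_right _ _ _ _ (by simp; omega)]
      rw [List.getD_eq_default _ _ (by simp; omega), if_neg h2]

-- the good-state vector as a list
def pvGoodList (z : List (Nat × Nat)) (size m : Nat) (suf : List Char) : List Int :=
  (List.range size).map (fun i => pvGoodFn z m suf i)

theorem pvGoodList_getD (z : List (Nat × Nat)) (size m : Nat) (suf : List Char) (i : Nat) :
    (pvGoodList z size m suf).getD i 0 = if i < size then pvGoodFn z m suf i else 0 := by
  unfold pvGoodList
  simp only [List.getD_eq_getElem?_getD, List.getElem?_map]
  by_cases hi : i < size <;> simp [hi]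

theorem pvG0_eq (z : List (Nat × Nat)) (m : Nat) :
    List.replicate m (0:Int) ++ [1] = pvGoodList z (m + 1) m [] := by
  apply List.ext_getElem (by simp [pvGoodList])
  intro j h1 h2
  have hj : j < m + 1 := by simpa [pvGoodList] using h2
  rw [← List.getD_eq_getElem _ 0 h1, ← List.getD_eq_getElem _ 0 h2,
      pvG0_getD, pvGoodList_getD, if_pos hj]
  rfl

theorem pvGStep_goodList (z : List (Nat × Nat)) (size m : Nat)
    (hz : ∀ q, ((z.getD q (0,0)).1 < size ∧ (z.getD q (0,0)).2 < size))
    (c : Char) (suf : List Char) :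
    pvGStepB z size m c (pvGoodList z size m suf) = pvGoodList z size m (c :: suf) := by
  apply List.ext_getElem (by simp [pvGStepB, pvGoodList])
  intro j h1 h2
  have hj : j < size := by simpa [pvGStepB] using h1
  have hδ : pvDeltaA z j c < size := by
    unfold pvDeltaA
    split
    · exact (hz j).2
    · exact (hz j).1
  rw [← List.getD_eq_getElem _ 0 h1, ← List.getD_eq_getElem _ 0 h2, pvGStepB_getD]
  rw [if_pos hj]
  rw [pvGoodList_getD z size m suf, if_pos hδ]
  rw [pvGoodList_getD z size m (c :: suf), if_pos hj]
  rw [show pvGoodFn z m (c :: suf) j = if j = m then 0 else pvGoodFn z m suf (pvDeltaA z j c) from rfl]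
  by_cases him : j = m
  · rw [if_pos him, if_neg (by tauto)]
  · rw [if_neg him]
    rcases pvGoodFn_01 z m suf (pvDeltaA z j c) with h0 | h1
    · rw [h0, if_neg (by simp)]
    · rw [h1, if_pos ⟨him, rfl⟩]

-- s[m-k] :: s[m-k+1:] = s[m-k:]
theorem pvDropCons (cs : List Char) (k : Nat) (h1 : 1 ≤ k) (h2 : k ≤ cs.length) :
    cs.drop (cs.length - k) = cs.getD (cs.length - k) ' ' :: cs.drop (cs.length - k + 1) := by
  have hlt : cs.length - k < cs.length := by omega
  rw [List.getD_eq_getElem _ _ hlt]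
  exact List.drop_eq_getElem_cons hlt

-- per-k equality of A's read-out sum and B's backward-DP entry
theorem pvTerm (cs : List Char) (n : Int) (k : Nat) (h1 : 1 ≤ k) (h2 : k ≤ cs.length - 1)
    (hm : 1 ≤ cs.length) :
    pvSumR (fun s1 =>
      (pvStepNA (pvZA cs) (cs.length + 1) (n - (k : Int)).toNat
        ((List.replicate (cs.length + 1) (0:Int)).set
          (pvRunA (pvZA cs) 0 (cs.drop (cs.length - k))) 1)).getD s1 0 *
      pvGoodFn (pvZA cs) cs.length (cs.drop (cs.length - k)) s1) cs.length =
    (pvBackB (pvZA cs) (cs.length + 1) (n - (k : Int)).toNat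
      (pvGoodList (pvZA cs) (cs.length + 1) cs.length (cs.drop (cs.length - k)))).getD
      (pvRunA (pvZA cs) 0 (cs.drop (cs.length - k))) 0 := by
  have hz := pvHz cs
  have hs0 : pvRunA (pvZA cs) 0 (cs.drop (cs.length - k)) < cs.length + 1 := by
    have := pvRunA_le cs (cs.drop (cs.length - k)) 0 (by omega)
    omega
  have hsuf : cs.drop (cs.length - k) =
      cs.getD (cs.length - k) ' ' :: cs.drop (cs.length - k + 1) :=
    pvDropCons cs k h1 (by omega)
  have hlast : (pvStepNA (pvZA cs) (cs.length + 1) (n - (k : Int)).toNat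
        ((List.replicate (cs.length + 1) (0:Int)).set
          (pvRunA (pvZA cs) 0 (cs.drop (cs.length - k))) 1)).getD cs.length 0 *
      pvGoodFn (pvZA cs) cs.length (cs.drop (cs.length - k)) cs.length = 0 := by
    rw [hsuf, show pvGoodFn (pvZA cs) cs.length (cs.getD (cs.length - k) ' ' :: cs.drop (cs.length - k + 1)) cs.length
        = if cs.length = cs.length then 0 else pvGoodFn (pvZA cs) cs.length (cs.drop (cs.length - k + 1))
            (pvDeltaA (pvZA cs) cs.length (cs.getD (cs.length - k) ' ')) from rfl,
      if_pos rfl, mul_zero]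
  rw [pvSumR_eq]
  have hx : ∑ s1 ∈ Finset.range cs.length,
      ((pvStepNA (pvZA cs) (cs.length + 1) (n - (k : Int)).toNat
        ((List.replicate (cs.length + 1) (0:Int)).set
          (pvRunA (pvZA cs) 0 (cs.drop (cs.length - k))) 1)).getD s1 0 *
      pvGoodFn (pvZA cs) cs.length (cs.drop (cs.length - k)) s1) = ∑ s1 ∈ Finset.range (cs.length + 1),
      (pvStepNA (pvZA cs) (cs.length + 1) (n - (k : Int)).toNat
        ((List.replicate (cs.length + 1) (0:Int)).set
          (pvRunA (pvZA cs) 0 (cs.drop (cs.length - k))) 1)).getD s1 0 *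
      pvGoodFn (pvZA cs) cs.length (cs.drop (cs.length - k)) s1 := by
    rw [Finset.sum_range_succ, hlast, add_zero]
  rw [hx]
  rw [← pvReadout (pvZA cs) (cs.length + 1) hz (n - (k : Int)).toNat _ hs0
      (pvGoodList (pvZA cs) (cs.length + 1) cs.length (cs.drop (cs.length - k)))]
  apply Finset.sum_congr rfl
  intro j hj
  rw [pvGoodList_getD, if_pos (Finset.mem_range.mp hj)]

-- A's initial term equals B's
theorem pvRes0_eq (cs : List Char) (n : Int) :
    (pvStepNA (pvZA cs) (cs.length + 1) n.toNat
      ((List.replicate (cs.length + 1) (0:Int)).set 0 1)).getD cs.length 0 =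
    (pvBackB (pvZA cs) (cs.length + 1) n.toNat
      (List.replicate cs.length (0:Int) ++ [1])).getD 0 0 := by
  have hz := pvHz cs
  rw [← pvReadout (pvZA cs) (cs.length + 1) hz n.toNat 0 (by omega)
      (List.replicate cs.length (0:Int) ++ [1])]
  symm
  calc ∑ j ∈ Finset.range (cs.length + 1),
        (pvStepNA (pvZA cs) (cs.length + 1) n.toNat
          ((List.replicate (cs.length + 1) (0:Int)).set 0 1)).getD j 0 *
          (List.replicate cs.length (0:Int) ++ [1]).getD j 0
      = ∑ j ∈ Finset.range (cs.length + 1),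
        (pvStepNA (pvZA cs) (cs.length + 1) n.toNat
          ((List.replicate (cs.length + 1) (0:Int)).set 0 1)).getD j 0 *
          (if j = cs.length then 1 else 0) :=
        Finset.sum_congr rfl (fun j _ => by rw [pvG0_getD])
    _ = (pvStepNA (pvZA cs) (cs.length + 1) n.toNat
          ((List.replicate (cs.length + 1) (0:Int)).set 0 1)).getD cs.length 0 := by
        rw [Finset.sum_eq_single cs.length]
        · rw [if_pos rfl, mul_one]
        · intro b _ hb
          rw [if_neg hb, mul_zero]
        · intro hne
          exact absurd (Finset.mem_range.mpr (by omega)) hne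

-- B's k-loop, unrolled to a sum
theorem pvFoldB (cs : List Char) (n : Int) :
    ∀ (count start : Nat) (res : Int), 1 ≤ start → start + count ≤ cs.length →
    ((List.range' start count).foldl (fun (st : List Int × Int) k =>
        let c := cs.getD (cs.length - k) ' '
        let g := pvGStepB (pvZA cs) (cs.length + 1) cs.length c st.1
        let s0 := pvRunA (pvZA cs) 0 (cs.drop (cs.length - k))
        (g, st.2 + (pvBackB (pvZA cs) (cs.length + 1) (n - (k : Int)).toNat g).getD s0 0))
      (pvGoodList (pvZA cs) (cs.length + 1) cs.length (cs.drop (cs.length - (start - 1))), res)).2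
    = res + ((List.range' start count).map (fun (k : Nat) =>
        (pvBackB (pvZA cs) (cs.length + 1) (n - (k : Int)).toNat
          (pvGoodList (pvZA cs) (cs.length + 1) cs.length (cs.drop (cs.length - k)))).getD
          (pvRunA (pvZA cs) 0 (cs.drop (cs.length - k))) 0)).sum := by
  intro count
  induction count with
  | zero => intro start res _ _; simp
  | succ count ih =>
    intro start res hs hsc
    rw [List.range'_succ]
    simp only [List.foldl_cons, List.map_cons, List.sum_cons]
    have hdrop : cs.drop (cs.length - start) =
        cs.getD (cs.length - start) ' ' :: cs.drop (cs.length - start + 1) :=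
      pvDropCons cs start hs (by omega)
    have hidx : cs.length - (start - 1) = cs.length - start + 1 := by omega
    have hstep : pvGStepB (pvZA cs) (cs.length + 1) cs.length (cs.getD (cs.length - start) ' ')
        (pvGoodList (pvZA cs) (cs.length + 1) cs.length (cs.drop (cs.length - (start - 1)))) =
        pvGoodList (pvZA cs) (cs.length + 1) cs.length (cs.drop (cs.length - start)) := by
      rw [hidx, hdrop]
      exact pvGStep_goodList (pvZA cs) (cs.length + 1) cs.length (pvHz cs) _ _
    simp only [hstep]
    have := ih (start + 1) (res + (pvBackB (pvZA cs) (cs.length + 1) (n - (start : Int)).toNat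
        (pvGoodList (pvZA cs) (cs.length + 1) cs.length (cs.drop (cs.length - start)))).getD
        (pvRunA (pvZA cs) 0 (cs.drop (cs.length - start))) 0) (by omega) (by omega)
    rw [show start + 1 - 1 = start from rfl] at this
    rw [this]
    ring

theorem pv_main (n : Int) (s : String) :
    count_distinct_cyclical_strings n s = count_distinct_cyclical_strings_alt n s := by
  simp only [count_distinct_cyclical_strings, count_distinct_cyclical_strings_alt,
    pvZB_eq, pvRunB_eq]
  set cs := s.toList with hcs
  by_cases hm : cs.length = 0
  · rw [show cs.length - 1 = 0 from by omega, List.range'_zero, List.foldl_nil, List.foldl_nil]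
    exact pvRes0_eq cs n
  · -- cs.length ≥ 1
    rw [pvFoldlCongr _
      (fun res (k : Nat) => res + pvSumR (fun s1 =>
        (pvStepNA (pvZA cs) (cs.length + 1) (n - (k : Int)).toNat
          ((List.replicate (cs.length + 1) (0:Int)).set
            (pvRunA (pvZA cs) 0 (cs.drop (cs.length - k))) 1)).getD s1 0 *
        pvGoodFn (pvZA cs) cs.length (cs.drop (cs.length - k)) s1) cs.length)
      _ _ (fun r k => pvTailA_eq (pvZA cs) cs.length (cs.drop (cs.length - k)) _ r),
      pvFoldlAdd]
    rw [pvRes0_eq cs n]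
    have hinit : List.replicate cs.length (0:Int) ++ [1] =
        pvGoodList (pvZA cs) (cs.length + 1) cs.length (cs.drop (cs.length - (1 - 1))) := by
      rw [show (1:Nat) - 1 = 0 from rfl, Nat.sub_zero, List.drop_length]
      exact pvG0_eq _ _
    rw [hinit]
    rw [pvFoldB cs n (cs.length - 1) 1 _ (le_refl 1) (by omega)]
    congr 1
    apply congrArg List.sum
    apply List.map_congr_left
    intro k hk
    have hk' : 1 ≤ k ∧ k ≤ cs.length - 1 := by
      rw [List.mem_range'] at hk
      obtain ⟨i, hi, hik⟩ := hk
      omega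
    exact pvTerm cs n k hk'.1 hk'.2 (by omega)

-- ===== VERDICT (by name: the statement is the Claim_ definition above) =====
theorem count_distinct_cyclical_strings_spec : Claim_equal_count_distinct_cyclical_strings := by
  intro n s _
  unfold Spec_count_distinct_cyclical_strings
  exact pv_main n s
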